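-- pv_equiv track=rewrite | github.com/lacanlale/AdventOfCode | solutions/day5p2.py | remove_reactants
-- ===== SOURCE A (Python) =====
-- def remove_reactants(arr):
--     index = 1
--     while index <= len(arr)-2:
--         if arr[index].lower() == arr[index-1].lower() and not(arr[index] == arr[index-1]):
--             del arr[index]
--             del arr[index-1]
--         index += 1
--     return arr
-- ===== SOURCE B (Python) =====
-- def remove_reactants(arr):
--     """One left-to-right pass over fixed indices, building a new list:
--     while a pair (j, j+1) still has an element after it, a pair of neighbours
--     that are the same letter in opposite case is dropped, the element at j+2
--     is carried over and scanning resumes at j+3; otherwise arr[j] is kept and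
--     the scan advances by one.  (Does not mutate its argument.)"""
--     out = []
--     j = 0
--     while j + 2 < len(arr):
--         if arr[j].lower() == arr[j + 1].lower() and arr[j] != arr[j + 1]:
--             out.append(arr[j + 2])
--             j += 3
--         else:
--             out.append(arr[j])
--             j += 1
--     out.extend(arr[j:])
--     return out
-- ===== Notes on version B (the rewrite author's own statement) =====
-- stated objective: alternative
-- what changed: Replaced the in-place while-loop that deletes reacting pairs from the middle of the list (shifting the tail on every del) by a single left-to-right index scan over the unchanged input that builds a fresh output list; B does not mutate its argument (the proved equivalence is about the return value).
import Mathlib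
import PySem

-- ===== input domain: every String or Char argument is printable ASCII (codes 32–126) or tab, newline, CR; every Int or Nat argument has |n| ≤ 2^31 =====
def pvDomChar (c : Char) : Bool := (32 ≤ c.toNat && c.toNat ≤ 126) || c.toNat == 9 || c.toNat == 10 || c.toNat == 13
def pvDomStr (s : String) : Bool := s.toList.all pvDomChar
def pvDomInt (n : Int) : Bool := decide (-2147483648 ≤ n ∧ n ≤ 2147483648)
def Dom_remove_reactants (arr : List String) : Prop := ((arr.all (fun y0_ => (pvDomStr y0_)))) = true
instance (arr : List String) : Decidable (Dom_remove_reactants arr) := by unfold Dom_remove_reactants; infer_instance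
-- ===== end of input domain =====

-- B replaces A's in-place deletion loop by a single index scan over the unchanged
-- input that builds a fresh list (A mutates its argument; the equivalence proved
-- here is about the return value).

-- ===== PORT A =====
-- A's while-loop: index starts at 1; while index ≤ len(arr)-2, compare arr[index]
-- with arr[index-1]; on a match delete both (del arr[index]; del arr[index-1]
-- removes exactly positions index-1 and index, rendered as take/drop); index += 1
-- either way.  arr[index]/arr[index-1] are rendered with getD "": every reachable
-- access has 1 ≤ index ≤ len(arr)-2, so the Python indexing never raises and getD
-- is exact there.
def remove_reactantsLoop (arr : List String) (index : Nat) : List String :=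
  if h : index + 2 ≤ arr.length then
    if PySem.Str.lower (arr.getD index "") = PySem.Str.lower (arr.getD (index - 1) "")
        ∧ ¬ (arr.getD index "" = arr.getD (index - 1) "") then
      remove_reactantsLoop (arr.take (index - 1) ++ arr.drop (index + 1)) (index + 1)
    else
      remove_reactantsLoop arr (index + 1)
  else
    arr
termination_by arr.length - index
decreasing_by
  · simp only [List.length_append, List.length_take, List.length_drop]; omega
  · omega

def remove_reactants (arr : List String) : List String :=
  remove_reactantsLoop arr 1

-- ===== PORT B =====
-- Source B's while-loop: state (out, j); while j+2 < len(arr), either drop the pair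
-- (j, j+1) and carry arr[j+2] over (j += 3) or keep arr[j] (j += 1); afterwards
-- append the remaining tail arr[j:].  Indexing rendered with getD "" (always in
-- range when read, guarded by j+2 < len(arr)).
def remove_reactantsAltLoop (arr : List String) (out : List String) (j : Nat) : List String :=
  if h : j + 2 < arr.length then
    if PySem.Str.lower (arr.getD j "") = PySem.Str.lower (arr.getD (j + 1) "")
        ∧ ¬ (arr.getD j "" = arr.getD (j + 1) "") then
      remove_reactantsAltLoop arr (out ++ [arr.getD (j + 2) ""]) (j + 3)
    else
      remove_reactantsAltLoop arr (out ++ [arr.getD j ""]) (j + 1)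
  else
    out ++ arr.drop j
termination_by arr.length - j

def remove_reactants_alt (arr : List String) : List String :=
  remove_reactantsAltLoop arr [] 0

-- ===== PRECONDITION & SPEC =====
def Spec_remove_reactants (arr : List String) (out : List String) : Prop := out = remove_reactants_alt arr
instance (arr : List String) (out : List String) : Decidable (Spec_remove_reactants arr out) := by unfold Spec_remove_reactants; infer_instance

-- ===== CLAIM (what is proved, stated in full; the proofs are below) =====
def Claim_equal_remove_reactants : Prop := ∀ (arr : List String), Dom_remove_reactants arr → Spec_remove_reactants arr (remove_reactants arr)

-- ===== LEMMAS AND PROOFS =====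

theorem pv_getD_append_right {α : Type} (l l' : List α) (i : Nat) (d : α) :
    (l ++ l').getD (l.length + i) d = l'.getD i d := by
  simp [List.getD, List.getElem?_append_right]

-- Invariant: A's live list is out ++ arr.drop j and its index is out.length + 1.
theorem pv_key : ∀ (fuel : Nat) (arr out : List String) (j : Nat), arr.length - j ≤ fuel →
    remove_reactantsLoop (out ++ arr.drop j) (out.length + 1)
      = remove_reactantsAltLoop arr out j := by
  intro fuel
  induction fuel with
  | zero =>
    intro arr out j hf
    have hj : arr.length ≤ j := by omega
    rw [remove_reactantsLoop, remove_reactantsAltLoop]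
    have hd : arr.drop j = [] := List.drop_eq_nil_of_le hj
    rw [dif_neg (by simp [hd]; omega), dif_neg (by omega)]
  | succ fuel ih =>
    intro arr out j hf
    rw [remove_reactantsLoop, remove_reactantsAltLoop]
    have hlendrop : (arr.drop j).length = arr.length - j := List.length_drop ..
    by_cases hg : j + 2 < arr.length
    · have hga : out.length + 1 + 2 ≤ (out ++ arr.drop j).length := by
        simp [List.length_append, hlendrop]; omega
      rw [dif_pos hga, dif_pos hg]
      have hj1 : (out ++ arr.drop j).getD (out.length + 1) "" = arr.getD (j + 1) "" := by
        have := pv_getD_append_right out (arr.drop j) 1 ""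
        rw [this]
        simp [List.getD, List.getElem?_drop]
      have hj0 : (out ++ arr.drop j).getD (out.length + 1 - 1) "" = arr.getD j "" := by
        have h0 : out.length + 1 - 1 = out.length + 0 := by omega
        rw [h0, pv_getD_append_right]
        simp [List.getD, List.getElem?_drop]
      rw [hj1, hj0]
      by_cases hc : PySem.Str.lower (arr.getD (j + 1) "") = PySem.Str.lower (arr.getD j "")
          ∧ ¬ (arr.getD (j + 1) "" = arr.getD j "")
      · rw [if_pos hc, if_pos ⟨hc.1.symm, fun e => hc.2 e.symm⟩]
        have htake : (out ++ arr.drop j).take (out.length + 1 - 1) = out := by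
          have h0 : out.length + 1 - 1 = out.length := by omega
          rw [h0, List.take_left]
        have hdropped : (out ++ arr.drop j).drop (out.length + 1 + 1) = arr.drop (j + 2) := by
          have h1 : out.length + 1 + 1 = out.length + 2 := by omega
          rw [h1, List.drop_append]
          simp [List.drop_eq_nil_of_le]
        rw [htake, hdropped]
        have hcons : arr.drop (j + 2) = arr.getD (j + 2) "" :: arr.drop (j + 3) := by
          have h2 : j + 2 < arr.length := hg
          rw [List.getD, List.getElem?_eq_getElem h2, Option.getD_some]
          exact (List.getElem_cons_drop h2).symm
        have := ih arr (out ++ [arr.getD (j + 2) ""]) (j + 3) (by omega)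
        rw [← this]
        rw [hcons]
        simp
      · rw [if_neg hc, if_neg (fun h => hc ⟨h.1.symm, fun e => h.2 e.symm⟩)]
        have hcons : arr.drop j = arr.getD j "" :: arr.drop (j + 1) := by
          have h0 : j < arr.length := by omega
          rw [List.getD, List.getElem?_eq_getElem h0, Option.getD_some]
          exact (List.getElem_cons_drop h0).symm
        have := ih arr (out ++ [arr.getD j ""]) (j + 1) (by omega)
        rw [← this]
        rw [hcons]
        simp
    · rw [dif_neg hg, dif_neg (by simp [List.length_append, hlendrop]; omega)]

-- ===== VERDICT (by name: the statement is the Claim_ definition above) =====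
theorem remove_reactants_spec : Claim_equal_remove_reactants := by
  intro arr _
  unfold Spec_remove_reactants remove_reactants remove_reactants_alt
  have := pv_key arr.length arr [] 0 (by omega)
  simpa using this
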